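-- pv_equiv track=rewrite | github.com/KELLO83/Personas-Korea- | GNN_Neural_Network/scripts/build_canonicalization_candidates.py | _assign_hobbies_to_suffixes
-- ===== SOURCE A (Python) =====
-- from collections import Counter, defaultdict
-- from typing import TypedDict, cast
--
-- class SingletonInfo(TypedDict):
--     normalized_name: str
--     members: list[str]
--     display_name: str
--     support_edges: int
--
-- def _assign_hobbies_to_suffixes(
--     singletons: dict[str, SingletonInfo],
--     candidate_suffixes: dict[str, set[str]],
-- ) -> dict[str, list[str]]:
--     assignments: dict[str, list[str]] = defaultdict(list)
--     ranked_suffixes = sorted(candidate_suffixes, key=lambda suffix: (-len(suffix.split()), -len(suffix), suffix))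
--     for hobby_name in singletons:
--         for suffix in ranked_suffixes:
--             if hobby_name in candidate_suffixes[suffix]:
--                 assignments[suffix].append(hobby_name)
--                 break
--     return assignments
-- ===== SOURCE B (Python) =====
-- def _assign_hobbies_to_suffixes(singletons, candidate_suffixes):
--     ranked_suffixes = sorted(candidate_suffixes, key=lambda suffix: (-len(suffix.split()), -len(suffix), suffix))
--     # invert once: best[hobby] = highest-ranked suffix whose set contains it
--     # (walk ranked order backwards so earlier-ranked suffixes overwrite later ones)
--     best = {}
--     for suffix in reversed(ranked_suffixes):
--         for hobby in candidate_suffixes[suffix]: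
--             best[hobby] = suffix
--     assignments = {}
--     for hobby_name in singletons:
--         suffix = best.get(hobby_name)
--         if suffix is not None:
--             assignments.setdefault(suffix, []).append(hobby_name)
--     return assignments
-- ===== Notes on version B (the rewrite author's own statement) =====
-- stated objective: faster
-- what changed: Instead of scanning the ranked suffix list for every hobby, B inverts the suffix sets once (walking the ranked list backwards so the best-ranked suffix wins each hobby slot) and then assigns each hobby by a single dict lookup.
import Mathlib
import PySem

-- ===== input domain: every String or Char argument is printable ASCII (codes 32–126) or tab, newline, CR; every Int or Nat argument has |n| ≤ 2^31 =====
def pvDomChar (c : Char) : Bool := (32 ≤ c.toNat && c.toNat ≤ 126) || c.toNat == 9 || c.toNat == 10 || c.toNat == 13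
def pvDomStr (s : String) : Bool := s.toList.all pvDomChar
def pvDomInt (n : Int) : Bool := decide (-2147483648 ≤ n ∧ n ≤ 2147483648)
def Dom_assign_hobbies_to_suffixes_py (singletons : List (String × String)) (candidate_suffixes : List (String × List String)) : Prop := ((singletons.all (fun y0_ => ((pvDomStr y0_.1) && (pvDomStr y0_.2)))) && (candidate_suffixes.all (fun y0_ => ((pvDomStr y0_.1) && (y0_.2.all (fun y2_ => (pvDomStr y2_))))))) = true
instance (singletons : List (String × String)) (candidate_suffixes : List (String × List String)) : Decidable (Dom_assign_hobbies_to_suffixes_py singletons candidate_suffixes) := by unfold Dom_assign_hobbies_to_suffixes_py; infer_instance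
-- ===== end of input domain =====

-- B replaces A's per-hobby scan of the ranked suffix list by a single inversion of the
-- suffix sets (ranked list walked backwards, best-ranked suffix wins each hobby slot),
-- then one dict lookup per hobby; objective: faster.

-- Shared by both ports: Python's `key a < key b` for the tuple key
-- (-len(s.split()), -len(s), s), written out component-wise (exact: Python tuple
-- comparison is lexicographic; str `<` is `<` on toList per PYSEM).
def pvRankLt (a b : String) : Bool :=
  let wa : Int := ((PySem.Str.split₀ a).length : Int)
  let wb : Int := ((PySem.Str.split₀ b).length : Int)
  let la : Int := PySem.Str.len a
  let lb : Int := PySem.Str.len b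
  (-wa < -wb) || (-wa == -wb && ((-la < -lb) || (-la == -lb && decide (a.toList < b.toList))))

-- `sorted(candidate_suffixes, key=…)`: Python's sorted IS this insertion fold
-- (PySem.List.sorted_eq_foldl_insertBy, rfl), with the tuple key compared by pvRankLt.
def pvRanked (cd : PySem.Dict String (List String)) : List String :=
  cd.keys.foldl (fun acc x => PySem.List.insertBy (fun a b => pvRankLt a b) x acc) []

-- ===== PORT A =====
-- the inner `for suffix in ranked_suffixes: … break` loop of A
def pvAInner (cd : PySem.Dict String (List String)) (asg : PySem.Dict String (List String))
    (hobby : String) : List String → PySem.Dict String (List String)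
  | [] => asg
  | s :: rest =>
      if (cd.getD s []).contains hobby then asg.modify s [] (· ++ [hobby])
      else pvAInner cd asg hobby rest

def assign_hobbies_to_suffixes_py (singletons : List (String × String)) (candidate_suffixes : List (String × List String)) : List (String × List String) :=
  let cd := PySem.Dict.ofList candidate_suffixes
  let ranked := pvRanked cd
  ((PySem.Dict.ofList singletons).keys.foldl
      (fun asg hobby => pvAInner cd asg hobby ranked) PySem.Dict.empty).items

-- ===== PORT B =====
def assign_hobbies_to_suffixes_py_alt (singletons : List (String × String)) (candidate_suffixes : List (String × List String)) : List (String × List String) :=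
  let cd := PySem.Dict.ofList candidate_suffixes
  let ranked := pvRanked cd
  -- invert: for suffix in reversed(ranked): for hobby in cd[suffix]: best[hobby] = suffix
  let best := ranked.reverse.foldl
      (fun b s => (cd.getD s []).foldl (fun b h => b.insert h s) b) PySem.Dict.empty
  ((PySem.Dict.ofList singletons).keys.foldl
      (fun asg hobby =>
        match best.get? hobby with
        | some s => asg.modify s [] (· ++ [hobby])   -- assignments.setdefault(s, []).append(hobby)
        | none => asg) PySem.Dict.empty).items

-- ===== PRECONDITION & SPEC =====
def Spec_assign_hobbies_to_suffixes_py (singletons : List (String × String)) (candidate_suffixes : List (String × List String)) (out : List (String × List String)) : Prop := out = assign_hobbies_to_suffixes_py_alt singletons candidate_suffixes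
instance (singletons : List (String × String)) (candidate_suffixes : List (String × List String)) (out : List (String × List String)) : Decidable (Spec_assign_hobbies_to_suffixes_py singletons candidate_suffixes out) := by unfold Spec_assign_hobbies_to_suffixes_py; infer_instance

-- ===== CLAIM (what is proved, stated in full; the proofs are below) =====
def Claim_equal_assign_hobbies_to_suffixes_py : Prop := ∀ (singletons : List (String × String)) (candidate_suffixes : List (String × List String)), Dom_assign_hobbies_to_suffixes_py singletons candidate_suffixes → Spec_assign_hobbies_to_suffixes_py singletons candidate_suffixes (assign_hobbies_to_suffixes_py singletons candidate_suffixes)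

-- ===== LEMMAS AND PROOFS =====

-- an insert-everything fold over one suffix's member list: lookup afterwards
theorem pv_get_foldl_insert (vs : List String) (b : PySem.Dict String String) (s h : String) :
    ((vs.foldl (fun b h' => b.insert h' s) b).get? h)
      = if h ∈ vs then some s else b.get? h := by
  induction vs generalizing b with
  | nil => simp
  | cons v rest ih =>
      simp only [List.foldl_cons, ih, List.mem_cons]
      by_cases hr : h ∈ rest
      · simp [hr]
      · by_cases hv : h = v
        · subst hv; simp [hr, PySem.Dict.get?_insert_self]
        · simp [hr, hv, PySem.Dict.get?_insert_of_ne _ _ hv]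

-- the inversion fold: last write wins, i.e. the FIRST match in the reversed order
theorem pv_get_best (cd : PySem.Dict String (List String)) (l : List String)
    (b : PySem.Dict String String) (h : String) :
    ((l.foldl (fun b s => (cd.getD s []).foldl (fun b h' => b.insert h' s) b) b).get? h)
      = ((l.reverse.find? (fun s => (cd.getD s []).contains h)).or (b.get? h)) := by
  induction l generalizing b with
  | nil => simp
  | cons x xs ih =>
      rw [List.foldl_cons, ih, List.reverse_cons, List.find?_append, pv_get_foldl_insert]
      by_cases hx : h ∈ cd.getD x []
      · simp [List.find?, hx]
      · simp [List.find?, hx]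

-- A's inner break-loop returns the first ranked suffix containing the hobby
theorem pv_aInner_eq_find (cd : PySem.Dict String (List String))
    (asg : PySem.Dict String (List String)) (h : String) (l : List String) :
    pvAInner cd asg h l
      = match l.find? (fun s => (cd.getD s []).contains h) with
        | some s => asg.modify s [] (· ++ [h])
        | none => asg := by
  induction l with
  | nil => simp [pvAInner]
  | cons s rest ih =>
      by_cases hs : h ∈ cd.getD s []
      · simp [pvAInner, List.find?, hs]
      · simp [pvAInner, List.find?, hs, ih]

-- ===== VERDICT (by name: the statement is the Claim_ definition above) =====
theorem assign_hobbies_to_suffixes_py_spec : Claim_equal_assign_hobbies_to_suffixes_py := by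
  intro singletons candidate_suffixes _
  show assign_hobbies_to_suffixes_py singletons candidate_suffixes
      = assign_hobbies_to_suffixes_py_alt singletons candidate_suffixes
  unfold assign_hobbies_to_suffixes_py assign_hobbies_to_suffixes_py_alt
  simp only [pv_aInner_eq_find, pv_get_best, List.reverse_reverse, Option.or_none,
    PySem.Dict.get?_empty]
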